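-- pv_equiv track=rewrite | github.com/lp2016/New_Algorithm | leetcode_countNumbersWithUniqueDigits.py | countNumbersWithUniqueDigits2
-- ===== SOURCE A (Python) =====
-- def countNumbersWithUniqueDigits2(n):
--     if n<=1:
--         return 0
--     dp=[0]*(n+1)
--     dp[2]=91
--     if n==2:
--         return 91
--     for i in range(3,n+1):
--         j = 1
--         k = 9
--         res = 1
--         while j < i:
--             res = res * k
--             k = k - 1
--             j = j + 1
--         dp[i]=res*9+dp[i-1]
--     return dp[n]
-- ===== SOURCE B (Python) =====
-- def countNumbersWithUniqueDigits2(n):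
--     if n <= 1:
--         return 0
--     total = 91
--     cnt = 81
--     for i in range(3, min(n, 10) + 1):
--         cnt *= 11 - i
--         total += cnt
--     return total
-- ===== Notes on version B (the rewrite author's own statement) =====
-- stated objective: faster
-- what changed: B drops A's dp array and inner falling-product while-loop: it updates the per-length count incrementally in a single pass (cnt *= 11-i) and caps the loop where every longer length contributes zero, since a number with more digits than there are distinct digits must repeat one.
import Mathlib
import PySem

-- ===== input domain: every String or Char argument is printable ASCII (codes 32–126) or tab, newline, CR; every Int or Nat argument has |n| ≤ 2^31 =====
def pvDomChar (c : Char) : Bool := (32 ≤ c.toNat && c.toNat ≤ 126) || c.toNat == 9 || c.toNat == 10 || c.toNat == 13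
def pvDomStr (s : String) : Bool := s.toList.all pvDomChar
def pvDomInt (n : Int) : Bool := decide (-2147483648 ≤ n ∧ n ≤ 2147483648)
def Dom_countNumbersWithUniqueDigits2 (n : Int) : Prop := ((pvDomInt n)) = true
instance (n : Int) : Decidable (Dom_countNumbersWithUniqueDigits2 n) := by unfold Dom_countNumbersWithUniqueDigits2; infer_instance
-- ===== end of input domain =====

-- B recomputes each count incrementally (and stops once further lengths add 0), replacing A's
-- inner falling-product loop: a different, asymptotically faster algorithm with the same values.

-- ===== PORT A =====
-- the inner 'while j < i' loop of A; fuel (i-1).toNat bounds the iteration count (j runs 1..i),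
-- the Python guard 'j < i' is checked exactly as in the source
def pvWhile : Nat → Int → Int → Int → Int → Int
  | 0, _, _, _, res => res
  | f+1, i, j, k, res => if j < i then pvWhile f i (j+1) (k-1) (res*k) else res

-- one iteration of A's 'for i in range(3, n+1)' body; indices i and i-1 are in range
-- (3 ≤ i ≤ n < len dp = n+1), so the '.getD 0' after pyGet? never supplies the default
def pvStep (dp : List Int) (i : Int) : List Int :=
  dp.set i.toNat (pvWhile (i-1).toNat i 1 9 1 * 9 + (PySem.List.pyGet? dp (i-1)).getD 0)

def countNumbersWithUniqueDigits2 (n : Int) : Int :=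
  if n ≤ 1 then 0
  else
    let dp := List.replicate (n+1).toNat (0 : Int)
    let dp := dp.set 2 91
    if n = 2 then 91
    else
      let dp := (PySem.List.pyRange 3 (n+1) 1).foldl pvStep dp
      (PySem.List.pyGet? dp n).getD 0   -- dp[n], index in range

-- ===== PORT B =====
-- state = (cnt, total); the loop body is 'cnt *= 11 - i; total += cnt'
def pvBstep (s : Int × Int) (i : Int) : Int × Int :=
  (s.1 * (11 - i), s.2 + s.1 * (11 - i))

def countNumbersWithUniqueDigits2_alt (n : Int) : Int :=
  if n ≤ 1 then 0
  else ((PySem.List.pyRange 3 (min n 10 + 1) 1).foldl pvBstep (81, 91)).2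

-- ===== PRECONDITION & SPEC =====
def Spec_countNumbersWithUniqueDigits2 (n : Int) (out : Int) : Prop := out = countNumbersWithUniqueDigits2_alt n
instance (n : Int) (out : Int) : Decidable (Spec_countNumbersWithUniqueDigits2 n out) := by unfold Spec_countNumbersWithUniqueDigits2; infer_instance

-- ===== CLAIM (what is proved, stated in full; the proofs are below) =====
def Claim_equal_countNumbersWithUniqueDigits2 : Prop := ∀ (n : Int), Dom_countNumbersWithUniqueDigits2 n → Spec_countNumbersWithUniqueDigits2 n (countNumbersWithUniqueDigits2 n)

-- ===== LEMMAS AND PROOFS =====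

-- the mathematical recurrence both programs compute
def pvG : Nat → Int
  | 0 => 0
  | 1 => 0
  | 2 => 91
  | m+3 => pvWhile (m+2) ((m : Int)+3) 1 9 1 * 9 + pvG (m+2)

lemma pvWhile_zero (f : Nat) : ∀ (i j k : Int), pvWhile f i j k 0 = 0 := by
  induction f with
  | zero => intro i j k; rfl
  | succ f ih =>
      intro i j k
      unfold pvWhile
      split
      · rw [zero_mul]; exact ih i (j+1) (k-1)
      · rfl

lemma pvWhile_hits0 (f : Nat) : ∀ (i j k res : Int), 0 ≤ k → j + k < i → (i - j).toNat ≤ f →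
    pvWhile f i j k res = 0 := by
  induction f with
  | zero => intro i j k res hk hlt hf; omega
  | succ f ih =>
      intro i j k res hk hlt hf
      have hji : j < i := by omega
      unfold pvWhile
      rw [if_pos hji]
      rcases eq_or_lt_of_le hk with h0 | h1
      · rw [← h0, mul_zero]; exact pvWhile_zero f i (j+1) (-1 : Int)
      · exact ih i (j+1) (k-1) (res*k) (by omega) (by omega) (by omega)

lemma pvWhile_big (i : Int) (hi : 11 ≤ i) : pvWhile (i-1).toNat i 1 9 1 = 0 :=
  pvWhile_hits0 (i-1).toNat i 1 9 1 (by omega) (by omega) (by omega)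

lemma pvWhile_succ (f : Nat) : ∀ (i j k res : Int), i - j = (f : Int) →
    pvWhile (f+1) (i+1) j k res = pvWhile f i j k res * (k - f) := by
  induction f with
  | zero =>
      intro i j k res h
      unfold pvWhile
      rw [if_pos (show j < i + 1 by omega)]
      show res * k = res * (k - ((0:Nat) : Int))
      simp
  | succ f ih =>
      intro i j k res h
      have hji : j < i := by omega
      unfold pvWhile
      rw [if_pos (by omega : j < i + 1), if_pos hji]
      have := ih i (j+1) (k-1) (res*k) (by omega)
      rw [this]
      push_cast
      ring_nf

lemma pvG_stable (k : Nat) : pvG (10 + k) = pvG 10 := by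
  induction k with
  | zero => rfl
  | succ k ih =>
      have h1 : 10 + (k+1) = (k+8) + 3 := by omega
      rw [h1]
      show pvWhile (k+10) ((k+8 : Int)+3) 1 9 1 * 9 + pvG (k+10) = pvG 10
      have hb : pvWhile ((((k : Int)+8+3) - 1).toNat) ((k : Int)+8+3) 1 9 1 = 0 :=
        pvWhile_big ((k : Int)+8+3) (by omega)
      have hfuel : (((k : Int)+8+3) - 1).toNat = k+10 := by omega
      rw [hfuel] at hb
      rw [hb, zero_mul, zero_add, show k+10 = 10+k by omega, ih]

-- A's fold over range(3, m+1) keeps dp length fixed and stores pvG m at index m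
lemma A_inv (n : Int) (hn : 3 ≤ n) : ∀ m : Nat, 2 ≤ m → (m : Int) ≤ n →
    ((PySem.List.pyRange 3 ((m : Int)+1) 1).foldl pvStep
        ((List.replicate (n+1).toNat (0 : Int)).set 2 91)).length = (n+1).toNat ∧
    PySem.List.pyGet? ((PySem.List.pyRange 3 ((m : Int)+1) 1).foldl pvStep
        ((List.replicate (n+1).toNat (0 : Int)).set 2 91)) (m : Int) = some (pvG m) := by
  intro m
  induction m with
  | zero => intro h; omega
  | succ m ih =>
      intro h2 hle
      rcases Nat.lt_or_ge m 2 with hm | hm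
      · -- base case: m+1 = 2
        have : m = 1 := by omega
        subst this
        rw [show ((2 : Nat) : Int) + 1 = 3 by norm_num,
            PySem.List.pyRange_one_eq_nil (by norm_num : (3:Int) ≤ 3)]
        simp only [List.foldl_nil]
        constructor
        · simp
        · rw [show ((2 : Nat) : Int) = ((2 : Nat) : Int) by rfl, PySem.List.pyGet?_natCast]
          rw [List.getElem?_set_self (by simp; omega)]
          rfl
      · -- step case
        obtain ⟨hlen, hget⟩ := ih (by omega) (by omega)
        have hsplit : PySem.List.pyRange 3 (((m+1 : Nat) : Int)+1) 1
            = PySem.List.pyRange 3 ((m : Int)+1) 1 ++ [(m : Int)+1] := by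
          rw [show (((m+1 : Nat) : Int)+1) = ((m : Int)+1)+1 by push_cast; ring]
          exact PySem.List.pyRange_one_succ_right (by omega)
        rw [hsplit, List.foldl_append]
        set dpm := (PySem.List.pyRange 3 ((m : Int)+1) 1).foldl pvStep
          ((List.replicate (n+1).toNat (0 : Int)).set 2 91) with hdpm
        simp only [List.foldl_cons, List.foldl_nil]
        unfold pvStep
        have hidx : ((m : Int)+1).toNat = m+1 := by omega
        have hprev : ((m : Int)+1-1) = (m : Int) := by ring
        rw [hidx, hprev, hget]
        obtain ⟨m', rfl⟩ : ∃ m', m = m'+2 := ⟨m-2, by omega⟩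
        constructor
        · simp [hlen]
        · rw [PySem.List.pyGet?_natCast]
          rw [List.getElem?_set_self (by rw [hlen]; omega)]
          have hfuel : ((((m'+2 : Nat)) : Int)).toNat = m'+2 := by omega
          have hcast : ((m'+2 : Nat) : Int) + 1 = (m' : Int) + 3 := by push_cast; ring
          rw [hfuel, hcast]
          rfl
  -- (the final 'rfl' matches pvG (m'+3) = pvWhile (m'+2) (↑m'+3) 1 9 1 * 9 + pvG (m'+2))

lemma A_eq_pvG (n : Int) (hn : 3 ≤ n) : countNumbersWithUniqueDigits2 n = pvG n.toNat := by
  unfold countNumbersWithUniqueDigits2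
  rw [if_neg (by omega), if_neg (by omega)]
  obtain ⟨hlen, hget⟩ := A_inv n hn n.toNat (by omega) (by omega)
  have hcast : ((n.toNat : Int)) = n := by omega
  rw [hcast] at hget
  show (PySem.List.pyGet? ((PySem.List.pyRange 3 (n+1) 1).foldl pvStep
      ((List.replicate (n+1).toNat (0 : Int)).set 2 91)) n).getD 0 = pvG n.toNat
  rw [hget]
  rfl

-- B's fold over range(3, m'+3) computes (pvWhile-product * 9, pvG (m'+2))
lemma B_inv (m' : Nat) : (PySem.List.pyRange 3 ((m' : Int)+3) 1).foldl pvBstep (81, 91)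
    = (pvWhile (m'+1) ((m' : Int)+2) 1 9 1 * 9, pvG (m'+2)) := by
  induction m' with
  | zero =>
      rw [show ((0 : Nat) : Int) + 3 = 3 by norm_num,
          PySem.List.pyRange_one_eq_nil (by norm_num : (3:Int) ≤ 3)]
      simp only [List.foldl_nil]
      norm_num [pvWhile, pvG]
  | succ m' ih =>
      have hsplit : PySem.List.pyRange 3 (((m'+1 : Nat) : Int)+3) 1
          = PySem.List.pyRange 3 ((m' : Int)+3) 1 ++ [(m' : Int)+3] := by
        rw [show (((m'+1 : Nat) : Int)+3) = ((m' : Int)+3)+1 by push_cast; ring]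
        exact PySem.List.pyRange_one_succ_right (by omega)
      rw [hsplit, List.foldl_append, ih]
      simp only [List.foldl_cons, List.foldl_nil]
      unfold pvBstep
      have hsucc : pvWhile (m'+2) (((m' : Int)+2)+1) 1 9 1
          = pvWhile (m'+1) ((m' : Int)+2) 1 9 1 * (9 - (m'+1 : Nat)) :=
        pvWhile_succ (m'+1) ((m' : Int)+2) 1 9 1 (by push_cast; ring)
      have hsh : pvG (m'+1+2) = pvWhile (m'+2) ((m' : Int)+3) 1 9 1 * 9 + pvG (m'+2) := rfl
      rw [show ((m' : Int)+2)+1 = (m' : Int)+3 by ring] at hsucc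
      have hcast2 : ((m'+1 : Nat) : Int) + 2 = (m' : Int) + 3 := by push_cast; ring
      simp only [Prod.mk.injEq]
      constructor
      · rw [show m'+1+1 = m'+2 from rfl, hcast2, hsucc]
        push_cast
        ring
      · rw [hsh, hsucc]
        push_cast
        ring

lemma B_eq (n : Int) (hn : 2 ≤ n) :
    countNumbersWithUniqueDigits2_alt n = pvG (min n 10).toNat := by
  unfold countNumbersWithUniqueDigits2_alt
  rw [if_neg (by omega)]
  have h2 : 2 ≤ min n 10 := by omega
  obtain ⟨m', hm'⟩ : ∃ m' : Nat, min n 10 = (m' : Int) + 2 := ⟨(min n 10).toNat - 2, by omega⟩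
  rw [hm', show ((m' : Int)+2)+1 = (m' : Int)+3 by ring, B_inv]
  have : ((m' : Int)+2).toNat = m'+2 := by omega
  rw [this]

-- ===== VERDICT (by name: the statement is the Claim_ definition above) =====
theorem countNumbersWithUniqueDigits2_spec : Claim_equal_countNumbersWithUniqueDigits2 := by
  intro n _
  unfold Spec_countNumbersWithUniqueDigits2
  rcases (by omega : n ≤ 1 ∨ 1 < n) with h1 | h1
  · unfold countNumbersWithUniqueDigits2 countNumbersWithUniqueDigits2_alt
    rw [if_pos h1, if_pos h1]
  · rcases (by omega : n = 2 ∨ 2 < n) with h2 | h2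
    · subst h2; decide
    · have h3 : 3 ≤ n := by omega
      rw [A_eq_pvG n h3, B_eq n (by omega)]
      rcases (by omega : n ≤ 10 ∨ 10 < n) with h10 | h10
      · rw [min_eq_left h10]
      · rw [min_eq_right (by omega : (10:Int) ≤ n)]
        have : n.toNat = 10 + (n.toNat - 10) := by omega
        rw [this, pvG_stable]
        rfl
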